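-- pv_equiv track=rewrite | github.com/MiMoText/roman18 | Python-Scripts/epubs/dialects/rousseau.py | split_titlepage
-- ===== SOURCE A (Python) =====
-- def split_titlepage(text):
--     '''Split document into titlepage and actual text.
--
--     Source files from rousseauonline.ch have no consistent
--     text formatting at the start of the actual text, but it
--     seems to be the case that a metadata section is the last
--     part of the titlepage, followed by a page number (which
--     we already delete in `clean_up()`).
--     The metadata section looks exactly like page number markers,
--     except that it also includes non-numeric characters.
--     '''
--     # E.g. \[various characters, but at least one non-numeric\]
--     def is_marker(line):
--         if line.startswith('\['):
--             return any([c for c in line if not c.isnumeric()])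
--         return False
--     # pattern = r'\\\[(.*?\D+.*?)\\\]\n'
--     tp = []
--     rest = []
--     found_marker = False
--
--     for line in text.split('\n'):
--         if line.startswith(r'\[') and any([c for c in line if not c.isnumeric()]):
--             found_marker = True
--             line = line.strip('\[ ')
--             tp.append(line)
--         elif found_marker:
--             rest.append(line)
--         else:
--             tp.append(line)
--
--     titlepage = '\n'.join(tp)
--     rest = '\n'.join(rest)
--     return titlepage, rest
-- ===== SOURCE B (Python) =====
-- def split_titlepage(text):
--     '''Split document into titlepage and actual text.
--
--     Index-find decomposition: locate the first marker line, then build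
--     titlepage and rest from slices/filters of the line list.
--     '''
--     def is_marker(line):
--         return line.startswith('\\[') and any(not c.isnumeric() for c in line)
--
--     lines = text.split('\n')
--     first = next((i for i, l in enumerate(lines) if is_marker(l)), None)
--     if first is None:
--         return '\n'.join(lines), ''
--     tail = lines[first:]
--     tp = lines[:first] + [l.strip('\\[ ') for l in tail if is_marker(l)]
--     rest = [l for l in tail if not is_marker(l)]
--     return '\n'.join(tp), '\n'.join(rest)
-- ===== Notes on version B (the rewrite author's own statement) =====
-- stated objective: alternative
-- what changed: Replaced A's single stateful found_marker loop with an index-find pass (first marker line) plus slice/filter/map passes over the tail to build titlepage and rest.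
import Mathlib
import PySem

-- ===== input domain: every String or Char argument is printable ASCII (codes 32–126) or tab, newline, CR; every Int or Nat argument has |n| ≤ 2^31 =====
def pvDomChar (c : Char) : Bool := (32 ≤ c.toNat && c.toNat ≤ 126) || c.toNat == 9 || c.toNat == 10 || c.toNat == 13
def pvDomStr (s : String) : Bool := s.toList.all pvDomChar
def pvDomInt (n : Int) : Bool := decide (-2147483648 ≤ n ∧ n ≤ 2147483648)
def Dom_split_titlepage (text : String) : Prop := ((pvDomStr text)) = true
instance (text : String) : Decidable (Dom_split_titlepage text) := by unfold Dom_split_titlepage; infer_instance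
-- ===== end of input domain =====

-- B replaces A's stateful found_marker loop by an index-find plus filtered passes over the tail (alternative decomposition, same cost).


-- ===== PORT A =====
-- both Pythons' is_marker: line.startswith('\[') and any(c for c in line if not c.isnumeric())
-- (c.isnumeric() coincides with c.isdigit() on the ASCII domain, so Chars.isdigit is exact here)
def pvIsMarker (line : String) : Bool :=
  PySem.Str.startswith line "\\[" && !(line.toList.filter (fun c => !PySem.Chars.isdigit c)).isEmpty

-- line.strip('\[ ')
def pvStripMarker (line : String) : String := PySem.Str.stripChars line "\\[ "

-- A's loop: state (tp, rest, found_marker)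
def pvLoopA : List String → List String → List String → Bool → (List String × List String)
  | [], tp, rest, _ => (tp, rest)
  | l :: ls, tp, rest, fm =>
    if pvIsMarker l then pvLoopA ls (tp ++ [pvStripMarker l]) rest true
    else if fm then pvLoopA ls tp (rest ++ [l]) fm
    else pvLoopA ls (tp ++ [l]) rest fm

def split_titlepage (text : String) : String × String :=
  let p := pvLoopA ((PySem.Str.split? text "\n").getD []) [] [] false
  (PySem.Str.join "\n" p.1, PySem.Str.join "\n" p.2)

-- ===== PORT B =====
def split_titlepage_alt (text : String) : String × String :=
  let lines := (PySem.Str.split? text "\n").getD []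
  match lines.findIdx? pvIsMarker with
  | none => (PySem.Str.join "\n" lines, "")
  | some i =>
    let tail := lines.drop i
    (PySem.Str.join "\n" (lines.take i ++ (tail.filter pvIsMarker).map pvStripMarker),
     PySem.Str.join "\n" (tail.filter (fun l => !pvIsMarker l)))

-- ===== PRECONDITION & SPEC =====
def Spec_split_titlepage (text : String) (out : String × String) : Prop := out = split_titlepage_alt text
instance (text : String) (out : String × String) : Decidable (Spec_split_titlepage text out) := by unfold Spec_split_titlepage; infer_instance

-- ===== CLAIM (what is proved, stated in full; the proofs are below) =====
def Claim_equal_split_titlepage : Prop := ∀ (text : String), Dom_split_titlepage text → Spec_split_titlepage text (split_titlepage text)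

-- ===== LEMMAS AND PROOFS =====

-- once found_marker is set, markers (stripped) go to tp and the rest to rest
theorem pvLoopA_true (ls : List String) : ∀ tp rest,
    pvLoopA ls tp rest true
      = (tp ++ (ls.filter pvIsMarker).map pvStripMarker,
         rest ++ ls.filter (fun l => !pvIsMarker l)) := by
  induction ls with
  | nil => simp [pvLoopA]
  | cons l ls ih =>
    intro tp rest
    by_cases h : pvIsMarker l = true <;> simp [pvLoopA, h, ih]

-- before any marker, with found_marker still false, pvLoopA matches B's index-find shape
theorem pvLoopA_false (ls : List String) : ∀ tp,
    pvLoopA ls tp [] false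
      = (match ls.findIdx? pvIsMarker with
         | none => (tp ++ ls, [])
         | some i => (tp ++ ls.take i ++ ((ls.drop i).filter pvIsMarker).map pvStripMarker,
                      (ls.drop i).filter (fun l => !pvIsMarker l))) := by
  induction ls with
  | nil => simp [pvLoopA]
  | cons l ls ih =>
    intro tp
    by_cases h : pvIsMarker l = true
    · simp [pvLoopA, h, List.findIdx?_cons, pvLoopA_true]
    · simp only [pvLoopA, h, Bool.false_eq_true, if_false, ih, List.findIdx?_cons]
      cases hf : ls.findIdx? pvIsMarker <;> simp

-- ===== VERDICT (by name: the statement is the Claim_ definition above) =====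
theorem split_titlepage_spec : Claim_equal_split_titlepage := by
  intro text _
  unfold Spec_split_titlepage split_titlepage split_titlepage_alt
  rw [pvLoopA_false]
  cases hf : ((PySem.Str.split? text "\n").getD []).findIdx? pvIsMarker <;>
    simp [hf, PySem.Str.join]
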